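-- pv_equiv track=rewrite | github.com/incnone/necrobot | clparse.py | pop_commands_from_list
-- ===== SOURCE A (Python) =====
-- def pop_commands_from_list(args, cmd_list):
--     list_to_return = []
--     while True:
--         list_next_command = pop_command_from_list(args, cmd_list)
--         if not list_next_command:
--             return list_to_return
--         else:
--             list_to_return.append(list_next_command)
--
-- def pop_command_from_list(args, cmd_list):
--     arg_indicies_to_pop = []
--     list_to_return = []
--     found_command = False
--     for i, arg in enumerate(args):
--         if arg.startswith('-'): #this is a command
--             if found_command:
--                 break #for
--             else:
--                 command = arg.lstrip('-')
--                 if command in cmd_list: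
--                     list_to_return.append(command)
--                     arg_indicies_to_pop.append(i)
--                     found_command = True
--         elif found_command:
--             arg_indicies_to_pop.append(i)
--             list_to_return.append(arg)
--
--     for i in reversed(arg_indicies_to_pop):
--         del args[i]
--
--     return list_to_return
-- ===== SOURCE B (Python) =====
-- def pop_commands_from_list(args, cmd_list):
--     groups = []
--     leftovers = []
--     cur = None
--     for arg in args:
--         if arg.startswith('-'):
--             if cur is not None:
--                 groups.append(cur)
--                 cur = None
--             cmd = arg.lstrip('-')
--             if cmd in cmd_list:
--                 cur = [cmd]
--             else:
--                 leftovers.append(arg)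
--         elif cur is not None:
--             cur.append(arg)
--         else:
--             leftovers.append(arg)
--     if cur is not None:
--         groups.append(cur)
--     args[:] = leftovers
--     return groups
-- ===== Notes on version B (the rewrite author's own statement) =====
-- stated objective: alternative
-- what changed: A repeatedly rescans args from the start, extracting one command group per full pass and deleting its elements by index; B builds all groups and the leftover args in a single left-to-right pass with a current-group accumulator.
import Mathlib
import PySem

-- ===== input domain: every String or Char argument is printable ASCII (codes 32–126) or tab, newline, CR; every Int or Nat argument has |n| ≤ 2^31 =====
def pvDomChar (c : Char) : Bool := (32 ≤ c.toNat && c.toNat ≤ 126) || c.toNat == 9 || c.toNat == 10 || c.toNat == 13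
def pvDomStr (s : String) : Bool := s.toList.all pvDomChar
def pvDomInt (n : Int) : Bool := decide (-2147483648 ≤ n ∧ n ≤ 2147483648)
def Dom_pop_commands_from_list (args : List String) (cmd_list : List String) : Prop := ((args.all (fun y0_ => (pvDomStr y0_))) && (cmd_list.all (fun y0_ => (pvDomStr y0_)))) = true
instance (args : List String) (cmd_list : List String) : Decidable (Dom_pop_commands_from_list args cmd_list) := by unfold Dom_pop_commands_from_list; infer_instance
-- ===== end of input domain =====

-- B replaces A's repeated rescans (one full pass per extracted group) by a single left-to-right
-- pass building all groups at once. A mutates `args` in place; B performs the same mutation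
-- (args[:] = leftovers); the theorems below are about the RETURN value only.

-- ===== PORT A =====
-- hand port of arg.lstrip('-') — PySem has no lstrip-with-chars; drops exactly the leading '-' characters (exact)
def pvLstripDash (s : String) : String := String.ofList (s.toList.dropWhile (fun c => c == '-'))

-- the for-loop of pop_command_from_list over enumerate(args); `break` = returning the accumulators
def popCmdScan (cmd_list : List String) (l : List (Int × String)) (idxs : List Int) (ret : List String) (found : Bool) : List Int × List String :=
  match l with
  | [] => (idxs, ret)
  | (i, arg) :: rest =>
    if PySem.Str.startswith arg "-" then
      if found then (idxs, ret)          -- break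
      else
        let command := pvLstripDash arg
        if cmd_list.contains command then
          popCmdScan cmd_list rest (idxs ++ [i]) (ret ++ [command]) true
        else
          popCmdScan cmd_list rest idxs ret found
    else
      if found then popCmdScan cmd_list rest (idxs ++ [i]) (ret ++ [arg]) found
      else popCmdScan cmd_list rest idxs ret found

-- pop_command_from_list: returns (args after the in-place deletions, list_to_return).
-- `del args[i]` at a valid nonnegative index i (from enumerate) is List.eraseIdx at i.toNat (exact).
def pop_command_from_list (args : List String) (cmd_list : List String) : List String × List String :=
  let r := popCmdScan cmd_list (PySem.List.enumerate args 0) [] [] false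
  (r.1.reverse.foldl (fun a (i : Int) => a.eraseIdx i.toNat) args, r.2)

-- the `while True` loop; each productive pass deletes at least one element of args,
-- so fuel args.length + 1 is never exhausted
def popLoop (cmd_list : List String) : Nat → List String → List (List String) → List (List String)
  | 0, _, acc => acc
  | fuel + 1, args, acc =>
    let r := pop_command_from_list args cmd_list
    if r.2 = [] then acc else popLoop cmd_list fuel r.1 (acc ++ [r.2])

def pop_commands_from_list (args : List String) (cmd_list : List String) : List (List String) :=
  popLoop cmd_list (args.length + 1) args []

-- ===== PORT B =====
-- single pass of Source B: groups done so far, leftovers (the in-place mutation; dead for the return value), current open group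
def popAltScan (cmd_list : List String) (l : List String) (groups : List (List String)) (leftovers : List String) (cur : Option (List String)) : List (List String) :=
  match l with
  | [] =>
    match cur with
    | some g => groups ++ [g]
    | none => groups
  | arg :: rest =>
    if PySem.Str.startswith arg "-" then
      let groups' := match cur with | some g => groups ++ [g] | none => groups
      let cmd := pvLstripDash arg
      if cmd_list.contains cmd then popAltScan cmd_list rest groups' leftovers (some [cmd])
      else popAltScan cmd_list rest groups' (leftovers ++ [arg]) none
    else
      match cur with
      | some g => popAltScan cmd_list rest groups leftovers (some (g ++ [arg]))
      | none => popAltScan cmd_list rest groups (leftovers ++ [arg]) none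

def pop_commands_from_list_alt (args : List String) (cmd_list : List String) : List (List String) :=
  popAltScan cmd_list args [] [] none

-- ===== PRECONDITION & SPEC =====
def Spec_pop_commands_from_list (args : List String) (cmd_list : List String) (out : List (List String)) : Prop := out = pop_commands_from_list_alt args cmd_list
instance (args : List String) (cmd_list : List String) (out : List (List String)) : Decidable (Spec_pop_commands_from_list args cmd_list out) := by unfold Spec_pop_commands_from_list; infer_instance

-- ===== CLAIM (what is proved, stated in full; the proofs are below) =====
def Claim_equal_pop_commands_from_list : Prop := ∀ (args : List String) (cmd_list : List String), Dom_pop_commands_from_list args cmd_list → Spec_pop_commands_from_list args cmd_list (pop_commands_from_list args cmd_list)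

-- ===== LEMMAS AND PROOFS =====

-- an argument that opens a command group: starts with '-' and its stripped form is in cmd_list
def pvIsCmd (cmd_list : List String) (a : String) : Bool :=
  PySem.Str.startswith a "-" && cmd_list.contains (pvLstripDash a)

-- a non-option argument (phase 2 of A's scan keeps collecting these)
def pvPlain (a : String) : Bool := !PySem.Str.startswith a "-"

theorem popCmdScan_found (cmd_list : List String) (xs : List String) :
    ∀ (k : Int) (idxs : List Int) (ret : List String),
      popCmdScan cmd_list (PySem.List.enumerate xs k) idxs ret true
        = (idxs ++ PySem.List.pyRange k (k + (xs.takeWhile pvPlain).length) 1,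
           ret ++ xs.takeWhile pvPlain) := by
  induction xs with
  | nil =>
    intro k idxs ret
    simp [PySem.List.enumerate_nil, popCmdScan, PySem.List.pyRange_one_eq_nil (le_refl k)]
  | cons a xs ih =>
    intro k idxs ret
    rw [PySem.List.enumerate_cons]
    by_cases hs : PySem.Str.startswith a "-" = true
    · have hpl : pvPlain a = false := by simp only [pvPlain, hs, Bool.not_true]
      simp only [popCmdScan, hs, if_true, List.takeWhile_cons, hpl, Bool.false_eq_true, if_false,
        List.length_nil]
      simp [PySem.List.pyRange_one_eq_nil (le_refl k)]
    · simp only [Bool.not_eq_true] at hs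
      have hpl : pvPlain a = true := by simp only [pvPlain, hs, Bool.not_false]
      simp only [popCmdScan, hs, Bool.false_eq_true, if_false, if_true, List.takeWhile_cons, hpl,
        List.length_cons]
      rw [ih (k + 1) (idxs ++ [k]) (ret ++ [a])]
      have hlt : k < k + ((xs.takeWhile pvPlain).length + 1 : Nat) := by
        push_cast; omega
      have harith : k + ((xs.takeWhile pvPlain).length + 1 : Nat) = k + 1 + ((xs.takeWhile pvPlain).length : Nat) := by
        push_cast; ring
      rw [harith] at hlt ⊢
      rw [PySem.List.pyRange_one_cons hlt]
      simp

theorem popCmdScan_skip (cmd_list : List String) (xs : List String)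
    (h : ∀ a ∈ xs, pvIsCmd cmd_list a = false) :
    ∀ (k : Int) (idxs : List Int) (ret : List String),
      popCmdScan cmd_list (PySem.List.enumerate xs k) idxs ret false = (idxs, ret) := by
  induction xs with
  | nil => intro k idxs ret; simp [PySem.List.enumerate_nil, popCmdScan]
  | cons a xs ih =>
    intro k idxs ret
    have ha := h a (by simp)
    have h' : ∀ a ∈ xs, pvIsCmd cmd_list a = false := fun x hx => h x (by simp [hx])
    rw [PySem.List.enumerate_cons]
    by_cases hs : PySem.Str.startswith a "-" = true
    · have hc : ¬ (pvLstripDash a ∈ cmd_list) := by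
        have := by simpa [pvIsCmd] using ha
        exact this (by simpa using hs)
      simp only [popCmdScan, hs, if_true, Bool.false_eq_true, if_false,
        List.contains_eq_mem, hc, decide_false]
      exact ih h' (k + 1) idxs ret
    · simp only [Bool.not_eq_true] at hs
      simp only [popCmdScan, hs, Bool.false_eq_true, if_false]
      exact ih h' (k + 1) idxs ret

theorem popCmdScan_full (cmd_list : List String) (p : List String) (c : String) (t : List String)
    (hp : ∀ a ∈ p, pvIsCmd cmd_list a = false) (hc : pvIsCmd cmd_list c = true) :
    ∀ (k : Int),
      popCmdScan cmd_list (PySem.List.enumerate (p ++ c :: t) k) [] [] false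
        = ((k + p.length) :: PySem.List.pyRange (k + p.length + 1) (k + p.length + 1 + (t.takeWhile pvPlain).length) 1,
           pvLstripDash c :: t.takeWhile pvPlain) := by
  induction p with
  | nil =>
    intro k
    have hs : PySem.Str.startswith c "-" = true := by
      have := hc; simp only [pvIsCmd, Bool.and_eq_true] at this; exact this.1
    have hm : cmd_list.contains (pvLstripDash c) = true := by
      simp only [pvIsCmd, Bool.and_eq_true] at hc; exact hc.2
    simp only [List.nil_append, PySem.List.enumerate_cons, popCmdScan, hs, if_true,
      Bool.false_eq_true, if_false, hm]
    rw [popCmdScan_found cmd_list t (k + 1) [k] [pvLstripDash c]]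
    simp
  | cons a p' ih =>
    intro k
    have ha := hp a (by simp)
    have hp' : ∀ x ∈ p', pvIsCmd cmd_list x = false := fun x hx => hp x (by simp [hx])
    rw [List.cons_append, PySem.List.enumerate_cons]
    have key : popCmdScan cmd_list ((k, a) :: PySem.List.enumerate (p' ++ c :: t) (k + 1)) [] [] false
        = popCmdScan cmd_list (PySem.List.enumerate (p' ++ c :: t) (k + 1)) [] [] false := by
      by_cases hs : PySem.Str.startswith a "-" = true
      · have hcna : ¬ (pvLstripDash a ∈ cmd_list) := by
          have := by simpa [pvIsCmd] using ha
          exact this (by simpa using hs)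
        have hs' : PySem.Chars.startswith a.toList ['-'] = true := by simpa using hs
        simp [popCmdScan, hs', List.contains_eq_mem, hcna]
      · simp only [Bool.not_eq_true] at hs
        have hs' : PySem.Chars.startswith a.toList ['-'] = false := by simpa using hs
        simp [popCmdScan, hs']
    rw [key, ih hp' (k + 1)]
    have e1 : k + 1 + (p'.length : Nat) = k + ((p'.length + 1 : Nat)) := by push_cast; ring
    rw [e1]
    simp

theorem dropWhile_head_false {α : Type} (P : α → Bool) (l : List α) (c : α) (t : List α)
    (h : l.dropWhile P = c :: t) : P c = false := by
  induction l with
  | nil => simp at h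
  | cons a l ih =>
    by_cases hp : P a = true
    · rw [List.dropWhile_cons_of_pos hp] at h; exact ih h
    · rw [List.dropWhile_cons_of_neg hp] at h
      cases h; simpa using hp

theorem eraseIdx_middle {α : Type} (q : List α) (x : α) (v : List α) :
    (q ++ x :: v).eraseIdx q.length = q ++ v := by
  induction q with
  | nil => rfl
  | cons b q ih => simpa [List.eraseIdx] using ih

theorem erase_block (u : List String) :
    ∀ (n : Int) (q v : List String), n = q.length →
      (PySem.List.pyRange n (n + u.length) 1).reverse.foldl
          (fun a (i : Int) => a.eraseIdx i.toNat) (q ++ (u ++ v))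
        = q ++ v := by
  induction u with
  | nil =>
    intro n q v hn
    simp [PySem.List.pyRange_one_eq_nil (le_refl n)]
  | cons x u ih =>
    intro n q v hn
    simp only [List.length_cons]
    have hlt : n < n + ((u.length + 1 : Nat)) := by push_cast; omega
    rw [PySem.List.pyRange_one_cons hlt, List.reverse_cons, List.foldl_append]
    have e1 : n + ((u.length + 1 : Nat) : Int) = (n + 1) + (u.length : Nat) := by push_cast; ring
    rw [e1]
    have h2 : (n + 1) = ((q ++ [x]).length : Int) := by simp [hn]
    have h3 : (q ++ [x]) ++ (u ++ v) = q ++ (x :: u ++ v) := by simp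
    rw [← h3, ih (n + 1) (q ++ [x]) v h2]
    have hnn : n.toNat = q.length := by omega
    simp only [List.foldl_cons, List.foldl_nil, List.append_assoc, List.singleton_append, hnn]
    exact eraseIdx_middle q x v

theorem pass_spec (args cmd_list : List String) :
    pop_command_from_list args cmd_list
      = match args.dropWhile (fun a => !pvIsCmd cmd_list a) with
        | [] => (args, [])
        | c :: t =>
            (args.takeWhile (fun a => !pvIsCmd cmd_list a) ++ t.dropWhile pvPlain,
             pvLstripDash c :: t.takeWhile pvPlain) := by
  obtain ⟨p, hp⟩ : ∃ p, args.takeWhile (fun a => !pvIsCmd cmd_list a) = p := ⟨_, rfl⟩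
  have hsplit := List.takeWhile_append_dropWhile (p := fun a => !pvIsCmd cmd_list a) (l := args)
  have htw : ∀ a ∈ p, pvIsCmd cmd_list a = false := by
    intro a ha
    rw [← hp] at ha
    have := List.mem_takeWhile_imp ha
    simpa using this
  rw [hp] at hsplit
  cases hd : args.dropWhile (fun a => !pvIsCmd cmd_list a) with
  | nil =>
    rw [hd] at hsplit
    have heq : args = p := by rw [← hsplit]; simp
    have hall : ∀ a ∈ args, pvIsCmd cmd_list a = false := by
      intro a ha
      exact htw a (by rw [← heq]; exact ha)
    simp only [pop_command_from_list]
    rw [popCmdScan_skip cmd_list args hall 0 [] []]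
    simp
  | cons c t =>
    rw [hd] at hsplit
    have hc : pvIsCmd cmd_list c = true := by
      have := dropWhile_head_false (fun a => !pvIsCmd cmd_list a) args c t hd
      simpa using this
    have hargs : args = p ++ c :: t := hsplit.symm
    have ht : t.takeWhile pvPlain ++ t.dropWhile pvPlain = t := List.takeWhile_append_dropWhile
    simp only [pop_command_from_list, hp]
    rw [show PySem.List.enumerate args 0 = PySem.List.enumerate (p ++ c :: t) 0 from by rw [← hargs]]
    rw [popCmdScan_full cmd_list p c t htw hc 0]
    simp only [List.reverse_cons, List.foldl_append, List.foldl_cons, List.foldl_nil]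
    refine Prod.ext ?_ rfl
    simp only []
    rw [hargs]
    have hinner :
        (PySem.List.pyRange (0 + (p.length : Nat) + 1)
            (0 + (p.length : Nat) + 1 + ((t.takeWhile pvPlain).length : Nat)) 1).reverse.foldl
          (fun a (i : Int) => a.eraseIdx i.toNat) (p ++ c :: t)
        = (p ++ [c]) ++ t.dropWhile pvPlain := by
      have hshape : p ++ c :: t = (p ++ [c]) ++ (t.takeWhile pvPlain ++ t.dropWhile pvPlain) := by
        rw [ht]; simp
      rw [hshape]
      exact erase_block (t.takeWhile pvPlain) (0 + (p.length : Nat) + 1) (p ++ [c])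
        (t.dropWhile pvPlain) (by simp)
    rw [hinner]
    have htn : ((0 + (p.length : Nat) : Int)).toNat = p.length := by omega
    rw [htn]
    have hfin : (p ++ [c]) ++ t.dropWhile pvPlain = p ++ c :: t.dropWhile pvPlain := by simp
    rw [hfin]
    exact eraseIdx_middle _ c _

theorem popAltScan_leftovers (cmd_list : List String) (l : List String) :
    ∀ groups lo lo' cur,
      popAltScan cmd_list l groups lo cur = popAltScan cmd_list l groups lo' cur := by
  induction l with
  | nil => intro _ _ _ _; rfl
  | cons a rest ih =>
    intro groups lo lo' cur
    cases cur <;> simp only [popAltScan] <;> (repeat' split) <;> apply ih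

theorem popAltScan_skip (cmd_list : List String) (p : List String)
    (hp : ∀ a ∈ p, pvIsCmd cmd_list a = false) :
    ∀ (rest : List String) (groups : List (List String)) (lo : List String),
      popAltScan cmd_list (p ++ rest) groups lo none = popAltScan cmd_list rest groups lo none := by
  induction p with
  | nil => intro _ _ _; rfl
  | cons a p' ih =>
    intro rest groups lo
    have ha := hp a (by simp)
    have hp' : ∀ a ∈ p', pvIsCmd cmd_list a = false := fun x hx => hp x (by simp [hx])
    simp only [List.cons_append, popAltScan]
    by_cases hs : PySem.Str.startswith a "-" = true
    · have hc : ¬ (pvLstripDash a ∈ cmd_list) := by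
        have := by simpa [pvIsCmd] using ha
        exact this (by simpa using hs)
      simp only [hs, if_true, List.contains_eq_mem, hc, decide_false, Bool.false_eq_true, if_false]
      rw [popAltScan_leftovers cmd_list _ _ (lo ++ [a]) lo, ih hp' rest groups lo]
    · simp only [Bool.not_eq_true] at hs
      simp only [hs, Bool.false_eq_true, if_false]
      rw [popAltScan_leftovers cmd_list _ _ (lo ++ [a]) lo, ih hp' rest groups lo]

theorem popAltScan_collect (cmd_list : List String) (t : List String) :
    ∀ (g : List String) (groups : List (List String)) (lo : List String),
      popAltScan cmd_list t groups lo (some g)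
        = popAltScan cmd_list (t.dropWhile pvPlain) groups lo (some (g ++ t.takeWhile pvPlain)) := by
  induction t with
  | nil => intro g groups lo; simp [List.dropWhile, List.takeWhile]
  | cons a t' ih =>
    intro g groups lo
    by_cases hs : PySem.Str.startswith a "-" = true
    · have : pvPlain a = false := by simp only [pvPlain, hs, Bool.not_true]
      simp [this]
    · simp only [Bool.not_eq_true] at hs
      have hpl : pvPlain a = true := by simp only [pvPlain, hs, Bool.not_false]
      simp only [List.dropWhile_cons, List.takeWhile_cons, hpl, if_true]
      simp only [popAltScan, hs, Bool.false_eq_true, if_false]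
      rw [ih (g ++ [a]) groups lo]
      simp

theorem popAltScan_close (cmd_list : List String) (v : List String)
    (hv : ∀ b ∈ v.head?, PySem.Str.startswith b "-" = true) :
    ∀ (g : List String) (groups : List (List String)) (lo : List String),
      popAltScan cmd_list v groups lo (some g) = popAltScan cmd_list v (groups ++ [g]) lo none := by
  intro g groups lo
  cases v with
  | nil => rfl
  | cons b v2 =>
    have hb : PySem.Str.startswith b "-" = true := hv b (by simp)
    simp only [popAltScan, hb, if_true]

-- main_loop on top of everything
theorem main_loop (cmd_list : List String) :
    ∀ (n : Nat) (args : List String) (groups : List (List String)) (lo : List String),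
      args.length < n →
      popAltScan cmd_list args groups lo none = popLoop cmd_list n args groups := by
  intro n
  induction n with
  | zero => intro args _ _ h; omega
  | succ n ih =>
    intro args groups lo h
    obtain ⟨p, hp⟩ : ∃ p, args.takeWhile (fun a => !pvIsCmd cmd_list a) = p := ⟨_, rfl⟩
    have htw : ∀ a ∈ p, pvIsCmd cmd_list a = false := by
      intro a ha
      rw [← hp] at ha
      have := List.mem_takeWhile_imp ha
      simpa using this
    have hsplit := List.takeWhile_append_dropWhile (p := fun a => !pvIsCmd cmd_list a) (l := args)
    rw [hp] at hsplit
    have hps := pass_spec args cmd_list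
    cases hd : args.dropWhile (fun a => !pvIsCmd cmd_list a) with
    | nil =>
      rw [hd] at hps hsplit
      have hargs : args = p := by rw [← hsplit]; simp
      simp only [popLoop, hps, if_true]
      rw [hargs, show (p : List String) = p ++ [] from by simp, popAltScan_skip cmd_list p htw]
      rfl
    | cons c t =>
      rw [hd] at hps hsplit
      have hargs : args = p ++ c :: t := hsplit.symm
      have hc : pvIsCmd cmd_list c = true := by
        have := dropWhile_head_false (fun a => !pvIsCmd cmd_list a) args c t hd
        simpa using this
      have hcs : PySem.Str.startswith c "-" = true := by
        simp only [pvIsCmd, Bool.and_eq_true] at hc; exact hc.1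
      have hcm : cmd_list.contains (pvLstripDash c) = true := by
        simp only [pvIsCmd, Bool.and_eq_true] at hc; exact hc.2
      have hlen : (p ++ t.dropWhile pvPlain).length < n := by
        have h1 : (t.dropWhile pvPlain).length ≤ t.length := List.length_dropWhile_le _ _
        have h2 : args.length = p.length + t.length + 1 := by rw [hargs]; simp; omega
        simp only [List.length_append]
        omega
      have hret : pvLstripDash c :: t.takeWhile pvPlain ≠ [] := by simp
      simp only [popLoop, hps, hp, if_neg hret]
      rw [← ih (p ++ t.dropWhile pvPlain) (groups ++ [pvLstripDash c :: t.takeWhile pvPlain]) lo hlen]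
      rw [popAltScan_skip cmd_list p htw]
      -- LHS side
      rw [hargs, popAltScan_skip cmd_list p htw]
      have step : popAltScan cmd_list (c :: t) groups lo none
          = popAltScan cmd_list t groups lo (some [pvLstripDash c]) := by
        simp only [popAltScan, hcs, hcm, if_true]
      rw [step, popAltScan_collect cmd_list t [pvLstripDash c] groups lo]
      have hhead : ∀ b ∈ (t.dropWhile pvPlain).head?, PySem.Str.startswith b "-" = true := by
        intro b hb
        cases hdw : t.dropWhile pvPlain with
        | nil => rw [hdw] at hb; simp at hb
        | cons b0 v2 =>
          rw [hdw] at hb; simp at hb; subst hb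
          have := dropWhile_head_false pvPlain t b0 v2 hdw
          simpa [pvPlain] using this
      rw [popAltScan_close cmd_list (t.dropWhile pvPlain) hhead]
      simp

-- ===== VERDICT (by name: the statement is the Claim_ definition above) =====
theorem pop_commands_from_list_spec : Claim_equal_pop_commands_from_list := by
  intro args cmd_list _
  unfold Spec_pop_commands_from_list pop_commands_from_list pop_commands_from_list_alt
  exact (main_loop cmd_list (args.length + 1) args [] [] (Nat.lt_succ_self _)).symm
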